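-- pv_equiv track=rewrite | github.com/tiation/ProtectChildrenAustralia | update_blog_navigation.py | create_post_navigation
-- ===== SOURCE A (Python) =====
-- def create_post_navigation(current_post, all_posts):
--     """Create previous/next navigation for blog posts."""
--     prev_link = ""
--     next_link = ""
--
--     current_index = None
--     for i, (post_num, filename) in enumerate(all_posts):
--         if post_num == current_post:
--             current_index = i
--             break
--
--     if current_index is not None:
--         if current_index > 0:
--             prev_filename = all_posts[current_index - 1][1]
--             prev_link = f'<a href="{prev_filename}" class="btn btn-outline-primary"><i class="fas fa-chevron-left"></i> Previous Post</a>'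
--
--         if current_index < len(all_posts) - 1:
--             next_filename = all_posts[current_index + 1][1]
--             next_link = f'<a href="{next_filename}" class="btn btn-outline-primary">Next Post <i class="fas fa-chevron-right"></i></a>'
--
--     return f'''
--     <!-- Post Navigation -->
--     <nav class="post-navigation py-4 border-top mt-4">
--         <div class="container">
--             <div class="row">
--                 <div class="col-6">
--                     {prev_link}
--                 </div>
--                 <div class="col-6 text-end">
--                     {next_link}
--                 </div>
--             </div>
--             <div class="text-center mt-3">
--                 <a href="../blog.html" class="btn btn-primary">
--                     <i class="fas fa-th-large"></i> Browse All Articles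
--                 </a>
--             </div>
--         </div>
--     </nav>
-- '''
-- ===== SOURCE B (Python) =====
-- def create_post_navigation(current_post, all_posts):
--     """Create previous/next navigation for blog posts."""
--     prev_link = ""
--     next_link = ""
--
--     prev_entry = None
--     found = False
--     for post_num, filename in all_posts:
--         if found:
--             next_link = f'<a href="{filename}" class="btn btn-outline-primary">Next Post <i class="fas fa-chevron-right"></i></a>'
--             break
--         if post_num == current_post:
--             found = True
--             if prev_entry is not None:
--                 prev_link = f'<a href="{prev_entry}" class="btn btn-outline-primary"><i class="fas fa-chevron-left"></i> Previous Post</a>'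
--         else:
--             prev_entry = filename
--
--     return f'''
--     <!-- Post Navigation -->
--     <nav class="post-navigation py-4 border-top mt-4">
--         <div class="container">
--             <div class="row">
--                 <div class="col-6">
--                     {prev_link}
--                 </div>
--                 <div class="col-6 text-end">
--                     {next_link}
--                 </div>
--             </div>
--             <div class="text-center mt-3">
--                 <a href="../blog.html" class="btn btn-primary">
--                     <i class="fas fa-th-large"></i> Browse All Articles
--                 </a>
--             </div>
--         </div>
--     </nav>
-- '''
-- ===== Notes on version B (the rewrite author's own statement) =====
-- stated objective: alternative
-- what changed: Replaces the enumerate-to-find-index scan followed by random-access neighbor indexing with a single pass that carries the previous element and a found flag, never computing an integer index.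
import Mathlib
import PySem

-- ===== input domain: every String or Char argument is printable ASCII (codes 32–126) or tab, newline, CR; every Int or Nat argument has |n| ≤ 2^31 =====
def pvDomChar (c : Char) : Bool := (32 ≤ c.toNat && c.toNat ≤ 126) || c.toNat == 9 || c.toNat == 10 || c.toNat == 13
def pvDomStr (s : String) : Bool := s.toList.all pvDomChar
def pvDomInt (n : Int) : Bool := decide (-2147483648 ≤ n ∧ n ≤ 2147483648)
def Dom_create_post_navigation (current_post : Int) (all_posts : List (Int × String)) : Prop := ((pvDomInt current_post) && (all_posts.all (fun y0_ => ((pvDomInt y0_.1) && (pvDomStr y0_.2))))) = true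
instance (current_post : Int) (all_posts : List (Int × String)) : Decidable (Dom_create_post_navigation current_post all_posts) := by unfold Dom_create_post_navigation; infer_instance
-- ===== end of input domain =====

-- ===== PORT A =====
-- B re-implements the same navigation builder as a single pass carrying the previous
-- entry and a found flag (no index arithmetic and no random access); objective: alternative.
-- Shared string pieces of both Pythons' f-string templates (byte-for-byte).
def pvPre : String := "<a href=\""
def pvPrevMid : String := "\" class=\"btn btn-outline-primary\"><i class=\"fas fa-chevron-left\"></i> Previous Post</a>"
def pvNextMid : String := "\" class=\"btn btn-outline-primary\">Next Post <i class=\"fas fa-chevron-right\"></i></a>"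
def pvT1 : String := "\n    <!-- Post Navigation -->\n    <nav class=\"post-navigation py-4 border-top mt-4\">\n        <div class=\"container\">\n            <div class=\"row\">\n                <div class=\"col-6\">\n                    "
def pvT2 : String := "\n                </div>\n                <div class=\"col-6 text-end\">\n                    "
def pvT3 : String := "\n                </div>\n            </div>\n            <div class=\"text-center mt-3\">\n                <a href=\"../blog.html\" class=\"btn btn-primary\">\n                    <i class=\"fas fa-th-large\"></i> Browse All Articles\n                </a>\n            </div>\n        </div>\n    </nav>\n"

def pvPrevHtml (f : String) : String := pvPre ++ f ++ pvPrevMid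
def pvNextHtml (f : String) : String := pvPre ++ f ++ pvNextMid
def pvRender (prev_link next_link : String) : String :=
  pvT1 ++ prev_link ++ pvT2 ++ next_link ++ pvT3

-- A's enumerate-and-break scan for the first index with post_num == current_post.
def pvFindIdxA (current_post : Int) : List (Int × String) → Option Nat
  | [] => none
  | (post_num, _) :: rest =>
      if post_num = current_post then some 0
      else (pvFindIdxA current_post rest).map (· + 1)

def create_post_navigation (current_post : Int) (all_posts : List (Int × String)) : String :=
  match pvFindIdxA current_post all_posts with
  | none => pvRender "" ""
  | some current_index =>
      -- A's indexed accesses all_posts[current_index ± 1] are guarded in range, so getD is exact here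
      let prev_link := if current_index > 0 then
          pvPrevHtml (all_posts.getD (current_index - 1) (0, "")).2 else ""
      let next_link := if current_index < all_posts.length - 1 then
          pvNextHtml (all_posts.getD (current_index + 1) (0, "")).2 else ""
      pvRender prev_link next_link

-- ===== PORT B =====
-- B's single pass: prev_entry is the element seen on the previous iteration; once the
-- flag is set the very next element's filename is the next link (the break).
def pvLoopB (current_post : Int) : List (Int × String) → Option String → String × String
  | [], _ => ("", "")
  | (post_num, filename) :: rest, prev_entry =>
      if post_num = current_post then
        ((match prev_entry with | some p => pvPrevHtml p | none => ""),
         (match rest with | (_, f2) :: _ => pvNextHtml f2 | [] => ""))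
      else pvLoopB current_post rest (some filename)

def create_post_navigation_alt (current_post : Int) (all_posts : List (Int × String)) : String :=
  let (prev_link, next_link) := pvLoopB current_post all_posts none
  pvRender prev_link next_link

-- ===== PRECONDITION & SPEC =====
def Spec_create_post_navigation (current_post : Int) (all_posts : List (Int × String)) (out : String) : Prop := out = create_post_navigation_alt current_post all_posts
instance (current_post : Int) (all_posts : List (Int × String)) (out : String) : Decidable (Spec_create_post_navigation current_post all_posts out) := by unfold Spec_create_post_navigation; infer_instance

-- ===== CLAIM (what is proved, stated in full; the proofs are below) =====
def Claim_equal_create_post_navigation : Prop := ∀ (current_post : Int) (all_posts : List (Int × String)), Dom_create_post_navigation current_post all_posts → Spec_create_post_navigation current_post all_posts (create_post_navigation current_post all_posts)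

-- ===== LEMMAS AND PROOFS =====
theorem pvFindIdxA_lt (current_post : Int) :
    ∀ (l : List (Int × String)) (j : Nat), pvFindIdxA current_post l = some j → j < l.length := by
  intro l
  induction l with
  | nil => intro j h; simp [pvFindIdxA] at h
  | cons hd tl ih =>
    intro j h
    obtain ⟨n, f⟩ := hd
    simp only [pvFindIdxA] at h
    by_cases hn : n = current_post
    · simp only [if_pos hn, Option.some.injEq] at h
      simp [← h]
    · simp [hn] at h
      obtain ⟨j', hj', rfl⟩ := h
      have := ih j' hj'
      simp only [List.length_cons]
      omega

theorem pvLoopB_eq (current_post : Int) :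
    ∀ (l : List (Int × String)) (p : Option String),
    pvLoopB current_post l p =
      match pvFindIdxA current_post l with
      | none => ("", "")
      | some i =>
          ((if i > 0 then pvPrevHtml (l.getD (i - 1) (0, "")).2
            else (p.map pvPrevHtml).getD ""),
           (if i < l.length - 1 then pvNextHtml (l.getD (i + 1) (0, "")).2 else "")) := by
  intro l
  induction l with
  | nil => intro p; simp [pvLoopB, pvFindIdxA]
  | cons hd tl ih =>
    intro p
    obtain ⟨n, f⟩ := hd
    by_cases h : n = current_post
    · simp only [pvLoopB, pvFindIdxA, if_pos h]
      cases p <;> cases tl <;> simp [List.getD]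
    · simp only [pvLoopB, pvFindIdxA, if_neg h, ih (some f)]
      cases hfi : pvFindIdxA current_post tl with
      | none => simp
      | some j =>
        have hj : j < tl.length := pvFindIdxA_lt current_post tl j hfi
        simp only [Option.map_some]
        cases j with
        | zero => simp [List.getD]
        | succ k =>
          have hcond : (k + 1 + 1 < ((n, f) :: tl).length - 1) = (k + 1 < tl.length - 1) := by
            simp only [List.length_cons, eq_iff_iff]; omega
          have h1 : (((n, f) :: tl).getD (k + 1 + 1 - 1) (0, "")) = tl.getD (k + 1 - 1) (0, "") := by
            simp [List.getD]
          have h2 : (((n, f) :: tl).getD (k + 1 + 1 + 1) (0, "")) = tl.getD (k + 1 + 1) (0, "") := by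
            simp [List.getD]
          simp only [hcond, h1, h2]
          simp

-- ===== VERDICT (by name: the statement is the Claim_ definition above) =====
theorem create_post_navigation_spec : Claim_equal_create_post_navigation := by
  intro current_post all_posts _
  unfold Spec_create_post_navigation
  unfold create_post_navigation create_post_navigation_alt
  rw [pvLoopB_eq]
  cases hfi : pvFindIdxA current_post all_posts with
  | none => rfl
  | some i => cases i <;> simp
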